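-- pv_equiv track=rewrite | github.com/DiamondLightSource/nxstacker | src/nxstacker/utils/parse.py | unique_or_raise
-- ===== SOURCE A (Python) =====
-- def unique_or_raise(iterable, companion=None, label="item", reference=None):
--     """Return unique item or raise when encounters inhomogeneous item.
--
--     Parameters
--     ----------
--     iterable : any iterable
--         the iterable which uniquenes is to be checked.
--     companion : any iterable, optional
--         the iterable relates to the iterable which uniqueness is to be
--         checked.  It must have the same length with the iterable above.
--         This is for more relevant error message. Default to None, set to
--         the same iterable above.
--     label : str, optional
--         the name of the item. This is for more descriptive error
--         message. Default to "item".
--     reference : Any, optional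
--         the reference to check uniqueness against. Default to None, set
--         to the first item of the iterable.
--
--     Returns
--     -------
--     the unique item
--
--     """
--     if companion is None:
--         companion = iterable
--
--     if len(iterable) != len(companion):
--         msg = (
--             "The companion must have the same length with the actual "
--             "iterable."
--         )
--         raise ValueError(msg)
--
--     seen = set()
--     for k, item in enumerate(iterable):
--         if reference is None:
--             reference = item
--
--         seen.add(item)
--         if len(seen) > 1:
--             msg = (
--                 f"Inhomogenous {label} for {companion[k]}. "
--                 f"This has {item} but the reference is {reference}."
--             )
--             raise RuntimeError(msg)
--
--     return seen.pop()
-- ===== SOURCE B (Python) =====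
-- def unique_or_raise(iterable, companion=None, label="item", reference=None):
--     """Return unique item or raise when encounters inhomogeneous item."""
--     if companion is None:
--         companion = iterable
--
--     if len(iterable) != len(companion):
--         msg = (
--             "The companion must have the same length with the actual "
--             "iterable."
--         )
--         raise ValueError(msg)
--
--     distinct = set(iterable)
--     if len(distinct) <= 1:
--         # raises KeyError on an empty iterable, like A's seen.pop()
--         return distinct.pop()
--
--     k = next(i for i in range(len(iterable)) if iterable[i] != iterable[0])
--     ref = reference if reference is not None else iterable[0]
--     msg = (
--         f"Inhomogenous {label} for {companion[k]}. "
--         f"This has {iterable[k]} but the reference is {ref}."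
--     )
--     raise RuntimeError(msg)
-- ===== Notes on version B (the rewrite author's own statement) =====
-- stated objective: alternative
-- what changed: A interleaves set-building with an early-exit raise test inside one enumerate loop; B builds the distinct-value set up front, returns if there is at most one value, and only then locates the first mismatching index to build the same error message.
import Mathlib
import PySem

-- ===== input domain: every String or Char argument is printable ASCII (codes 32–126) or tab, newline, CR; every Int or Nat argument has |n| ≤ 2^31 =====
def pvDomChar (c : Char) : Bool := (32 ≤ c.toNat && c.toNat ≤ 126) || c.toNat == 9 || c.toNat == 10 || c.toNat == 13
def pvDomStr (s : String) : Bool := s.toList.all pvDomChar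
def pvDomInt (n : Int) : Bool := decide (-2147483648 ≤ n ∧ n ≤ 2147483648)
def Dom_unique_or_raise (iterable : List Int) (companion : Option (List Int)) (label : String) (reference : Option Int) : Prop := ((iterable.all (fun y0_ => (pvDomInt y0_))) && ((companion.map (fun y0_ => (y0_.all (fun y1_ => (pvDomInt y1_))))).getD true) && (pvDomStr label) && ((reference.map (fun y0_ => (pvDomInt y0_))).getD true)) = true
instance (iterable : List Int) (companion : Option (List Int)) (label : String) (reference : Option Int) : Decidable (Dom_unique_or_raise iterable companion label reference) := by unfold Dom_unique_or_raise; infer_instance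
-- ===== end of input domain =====

-- B restructures A's single early-exit loop into: build set(iterable) up front,
-- return its element when it has at most one, else locate the first mismatch for
-- the error message (objective: alternative decomposition; same value wherever A returns).

-- ===== PORT A =====
-- A's enumerate loop: fold each item into `seen`, stopping (none = RuntimeError) when the set grows past 1.
def uorLoopA (items : List Int) (seen : PySem.Set Int) : Option (PySem.Set Int) :=
  match items with
  | [] => some seen
  | x :: rest =>
      let s := PySem.Set.add seen x
      if 1 < PySem.Set.len s then none else uorLoopA rest s

def unique_or_raise (iterable : List Int) (companion : Option (List Int)) (label : String) (reference : Option Int) : Int :=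
  let comp := companion.getD iterable
  if iterable.length ≠ comp.length then 0   -- ValueError: outside Pre_
  else
    (uorLoopA iterable PySem.Set.empty).elim
      0                                     -- RuntimeError: outside Pre_
      (fun seen =>
        if seen.length == 1 then seen.headD 0   -- seen.pop() on the one-element set
        else 0)                             -- KeyError on empty: outside Pre_

-- ===== PORT B =====
def unique_or_raise_alt (iterable : List Int) (companion : Option (List Int)) (label : String) (reference : Option Int) : Int :=
  let comp := companion.getD iterable
  if iterable.length ≠ comp.length then 0   -- ValueError: outside Pre_
  else
    let distinct := PySem.Set.ofList iterable
    if PySem.Set.len distinct ≤ 1 then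
      distinct.headD 0                      -- distinct.pop(); 0 stands for the KeyError on empty, outside Pre_
    else 0                                  -- RuntimeError: outside Pre_

-- ===== PRECONDITION & SPEC =====
-- Pre_ excludes exactly the inputs where A raises: empty iterable (KeyError from pop),
-- a companion of different length (ValueError), and inhomogeneous items (RuntimeError).
def Pre_unique_or_raise (iterable : List Int) (companion : Option (List Int)) (label : String) (reference : Option Int) : Prop :=
  iterable ≠ [] ∧ (∀ x ∈ iterable, x = iterable.headD 0) ∧ (companion.getD iterable).length = iterable.length
instance (iterable : List Int) (companion : Option (List Int)) (label : String) (reference : Option Int) : Decidable (Pre_unique_or_raise iterable companion label reference) := by unfold Pre_unique_or_raise; infer_instance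

def pvWitness_unique_or_raise : List Int × Option (List Int) × String × Option Int := ([7, 7, 7], some [1, 2, 3], "angle", some 9)

def Spec_unique_or_raise (iterable : List Int) (companion : Option (List Int)) (label : String) (reference : Option Int) (out : Int) : Prop := out = unique_or_raise_alt iterable companion label reference
instance (iterable : List Int) (companion : Option (List Int)) (label : String) (reference : Option Int) (out : Int) : Decidable (Spec_unique_or_raise iterable companion label reference out) := by unfold Spec_unique_or_raise; infer_instance

-- ===== CLAIM (what is proved, stated in full; the proofs are below) =====
def Claim_equal_unique_or_raise : Prop := ∀ (iterable : List Int) (companion : Option (List Int)) (label : String) (reference : Option Int), Dom_unique_or_raise iterable companion label reference → Pre_unique_or_raise iterable companion label reference → Spec_unique_or_raise iterable companion label reference (unique_or_raise iterable companion label reference)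

-- ===== LEMMAS AND PROOFS =====
lemma add_self (a : Int) : PySem.Set.add ([a] : PySem.Set Int) a = [a] := by
  simp [PySem.Set.add, PySem.Set.contains]

lemma uorLoopA_const (a : Int) : ∀ (rest : List Int), (∀ x ∈ rest, x = a) →
    uorLoopA rest [a] = some [a] := by
  intro rest
  induction rest with
  | nil => intro _; rfl
  | cons x xs ih =>
      intro h
      have hx : x = a := h x (by simp)
      subst hx
      simp only [uorLoopA, add_self, PySem.Set.len]
      exact ih (fun y hy => h y (by simp [hy]))

lemma ofList_const (a : Int) : ∀ (rest : List Int), (∀ x ∈ rest, x = a) →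
    PySem.Set.ofList (a :: rest) = [a] := by
  intro rest
  induction rest with
  | nil => intro _; rfl
  | cons x xs ih =>
      intro h
      have hx : x = a := h x (by simp)
      subst hx
      have h1 : ∀ y ∈ xs, y = x := fun y hy => h y (by simp [hy])
      have := ih h1
      simp only [PySem.Set.ofList_eq_foldl, List.foldl] at this ⊢
      simpa [add_self] using this

-- ===== VERDICT (by name: the statement is the Claim_ definition above) =====
theorem unique_or_raise_spec : Claim_equal_unique_or_raise := by
  intro iterable companion label reference _ hpre
  obtain ⟨hne, hconst, hlen⟩ := hpre
  unfold Spec_unique_or_raise unique_or_raise unique_or_raise_alt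
  obtain ⟨a, rest, rfl⟩ := List.exists_cons_of_ne_nil hne
  have hc : ∀ x ∈ rest, x = a := by
    intro x hx
    have := hconst x (by simp [hx])
    simpa using this
  have hloop : uorLoopA (a :: rest) ([] : PySem.Set Int) = some [a] := by
    simp only [uorLoopA, PySem.Set.add, PySem.Set.empty, PySem.Set.contains, PySem.Set.len]
    simpa using uorLoopA_const a rest hc
  have hof : PySem.Set.ofList (a :: rest) = [a] := ofList_const a rest hc
  simp [hlen, hloop, hof, PySem.Set.len]
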